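-- pv_equiv track=rewrite | github.com/mbjackson-capp/adventofcode | 2023/day4.py | part2
-- ===== SOURCE A (Python) =====
-- def num_matches(card):
--     """
--     Calculate how many matches there are between the winning numbers (left
--     side of the '|') and the numbers you have (right side of the '|') on a
--     properly-formatted scratch card.
--     """
--     _, winning_nums, nums_you_have = card
--     match_nums = [i for i in nums_you_have if i in winning_nums]
--     return len(match_nums)
--
-- def part2(scratch_cards):
--     # Track how many of each card there are
--     ids_ordered = [i[0] for i in scratch_cards]
--     LAST_CARD = ids_ordered[-1]
--     card_counts = {id: 1 for id in ids_ordered}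
--
--     for id in ids_ordered:
--         card = scratch_cards[id-1]
--         cards_to_copy = [
--             j for j in list(range(id + 1, id + num_matches(card) + 1))
--             if j <= LAST_CARD
--             ]
--         for copy_id in cards_to_copy:
--             # make one of each copy for EACH existing instance of this card
--             card_counts[copy_id] += card_counts[id]
--     total_points = sum(card_counts.values())
--     return total_points
-- ===== SOURCE B (Python) =====
-- def part2(scratch_cards):
--     # Reverse-order pull DP (the adjoint of A's forward push): processing ids
--     # back-to-front, w[i] becomes the total number of cards one instance of
--     # card i eventually yields at this point of the process; the answer is the
--     # sum of w over the distinct ids.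
--     ids = [card[0] for card in scratch_cards]
--     if not ids:
--         return 0
--     last = ids[-1]
--     w = {i: 1 for i in ids}
--     for i in reversed(ids):
--         _, win, have = scratch_cards[i - 1]
--         m = sum(1 for x in have if x in win)
--         w[i] += sum(w.get(j, 0) for j in range(i + 1, min(i + m, last) + 1))
--     return sum(w.values())
-- ===== Notes on version B (the rewrite author's own statement) =====
-- stated objective: alternative
-- what changed: Replaces A's forward push over the id-keyed dict (processing ids in order, card_counts[copy_id] += card_counts[id]) by the adjoint reverse-order pull: processing ids back to front, w[id] += sum of the w-values of its copy targets, so each entry is a self-contained downstream total; the sum of w equals A's total.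
import Mathlib
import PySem

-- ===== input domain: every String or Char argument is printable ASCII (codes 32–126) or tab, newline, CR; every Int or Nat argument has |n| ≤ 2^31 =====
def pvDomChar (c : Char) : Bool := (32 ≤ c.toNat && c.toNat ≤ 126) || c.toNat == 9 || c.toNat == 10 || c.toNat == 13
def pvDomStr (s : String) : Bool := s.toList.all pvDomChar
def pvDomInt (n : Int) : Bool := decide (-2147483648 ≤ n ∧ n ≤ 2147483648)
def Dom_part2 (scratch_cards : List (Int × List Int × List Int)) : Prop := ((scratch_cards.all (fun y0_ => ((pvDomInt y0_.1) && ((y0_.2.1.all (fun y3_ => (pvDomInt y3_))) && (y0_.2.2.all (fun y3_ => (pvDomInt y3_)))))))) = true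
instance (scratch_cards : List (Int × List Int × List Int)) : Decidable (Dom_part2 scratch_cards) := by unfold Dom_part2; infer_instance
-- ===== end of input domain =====

-- B replaces A's forward push of counts (card_counts[copy_id] += card_counts[id], ids in order)
-- by its adjoint: a reverse-order pull (w[id] += sum of the w of its copy targets, ids back to
-- front); same cost, different algorithm: objective "alternative".

-- ===== PORT A =====
def num_matches (card : Int × List Int × List Int) : Int :=
  let match_nums := card.2.2.filter (fun i => card.2.1.contains i)
  (match_nums.length : Int)

def part2 (scratch_cards : List (Int × List Int × List Int)) : Int :=
  let ids_ordered := scratch_cards.map (fun i => i.1)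
  -- ids_ordered[-1]: IndexError on empty input (excluded by Pre_)
  match PySem.List.pyGet? ids_ordered (-1) with
  | none => 0
  | some LAST_CARD =>
    let card_counts : PySem.Dict Int Int :=
      ids_ordered.foldl (fun d id => d.insert id 1) PySem.Dict.empty
    let card_counts := ids_ordered.foldl (fun d id =>
      -- scratch_cards[id-1]: IndexError when out of range (excluded by Pre_)
      let card := (PySem.List.pyGet? scratch_cards (id - 1)).getD (0, ([], []))
      let cards_to_copy := (PySem.List.pyRange (id + 1) (id + num_matches card + 1) 1).filter
        (fun j => decide (j ≤ LAST_CARD))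
      -- card_counts[copy_id] += card_counts[id]: KeyError when copy_id is no key (excluded by Pre_)
      cards_to_copy.foldl (fun d copy_id =>
        d.insert copy_id (d.getD copy_id 0 + d.getD id 0)) d) card_counts
    card_counts.values.sum

-- ===== PORT B =====
def part2_alt (scratch_cards : List (Int × List Int × List Int)) : Int :=
  let ids := scratch_cards.map (fun card => card.1)
  if ids = [] then 0
  else
    let last := (PySem.List.pyGet? ids (-1)).getD 0
    let w0 : PySem.Dict Int Int := ids.foldl (fun d i => d.insert i 1) PySem.Dict.empty
    let w := ids.reverse.foldl (fun w i =>
      -- scratch_cards[i-1]: IndexError when out of range (outside Pre_, as in A)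
      let card := (PySem.List.pyGet? scratch_cards (i - 1)).getD (0, ([], []))
      let m := card.2.2.countP (fun x => card.2.1.contains x)
      w.insert i (w.getD i 0 +
        ((PySem.List.pyRange (i + 1) (min (i + (m : Int)) last + 1) 1).map
          (fun j => w.getD j 0)).sum)) w0
    w.values.sum

-- ===== PRECONDITION & SPEC =====
-- Pre_ is exactly "A returns": it excludes the empty list (ids_ordered[-1] raises IndexError),
-- ids whose index id-1 falls outside Python's index range for scratch_cards (IndexError), and
-- ids one of whose copy targets ≤ LAST_CARD is not itself an id (KeyError on card_counts[copy_id]).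
def Pre_part2 (scratch_cards : List (Int × List Int × List Int)) : Prop :=
  scratch_cards ≠ [] ∧
  ∀ i ∈ scratch_cards.map (fun c => c.1),
    PySem.Raise.InRange scratch_cards.length (i - 1) ∧
    ∀ j ∈ PySem.List.pyRange (i + 1)
        (i + num_matches ((PySem.List.pyGet? scratch_cards (i - 1)).getD (0, ([], []))) + 1) 1,
      j ≤ (PySem.List.pyGet? (scratch_cards.map (fun c => c.1)) (-1)).getD 0 →
        j ∈ scratch_cards.map (fun c => c.1)
instance (scratch_cards : List (Int × List Int × List Int)) : Decidable (Pre_part2 scratch_cards) := by unfold Pre_part2; infer_instance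

def pvWitness_part2 : (List (Int × List Int × List Int)) := [(1, [1], [1, 2]), (2, [], [7])]

def Spec_part2 (scratch_cards : List (Int × List Int × List Int)) (out : Int) : Prop := out = part2_alt scratch_cards
instance (scratch_cards : List (Int × List Int × List Int)) (out : Int) : Decidable (Spec_part2 scratch_cards out) := by unfold Spec_part2; infer_instance

-- ===== CLAIM (what is proved, stated in full; the proofs are below) =====
def Claim_equal_part2 : Prop := ∀ (scratch_cards : List (Int × List Int × List Int)), Dom_part2 scratch_cards → Pre_part2 scratch_cards → Spec_part2 scratch_cards (part2 scratch_cards)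

-- ===== LEMMAS AND PROOFS =====

-- the copy targets of card id i (A's cards_to_copy)
def copiesOf (sc : List (Int × List Int × List Int)) (last i : Int) : List Int :=
  (PySem.List.pyRange (i + 1)
      (i + num_matches ((PySem.List.pyGet? sc (i - 1)).getD (0, ([], []))) + 1) 1).filter
    (fun j => decide (j ≤ last))

-- A's inner loop: push c[i] onto every copy target
def Fstep (sc : List (Int × List Int × List Int)) (last : Int)
    (d : PySem.Dict Int Int) (i : Int) : PySem.Dict Int Int :=
  (copiesOf sc last i).foldl (fun d j => d.insert j (d.getD j 0 + d.getD i 0)) d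

-- B's step: pull the copy targets' w into w[i]
def Gstep (sc : List (Int × List Int × List Int)) (last : Int)
    (w : PySem.Dict Int Int) (i : Int) : PySem.Dict Int Int :=
  w.insert i (w.getD i 0 + ((copiesOf sc last i).map (fun j => w.getD j 0)).sum)

def dotK (K : List Int) (c w : PySem.Dict Int Int) : Int :=
  (K.map (fun k => c.getD k 0 * w.getD k 0)).sum

def sumK (K : List Int) (d : PySem.Dict Int Int) : Int :=
  (K.map (fun k => d.getD k 0)).sum

-- an id whose processing step stays inside the key set K
def okId (sc : List (Int × List Int × List Int)) (K : List Int) (last i : Int) : Prop :=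
  i ∈ K ∧ ∀ j ∈ copiesOf sc last i, j ∈ K ∧ i < j

theorem filter_le_pyRange (L : Int) :
    ∀ (n : Nat) (a b : Int), (b - a).toNat = n →
      (PySem.List.pyRange a b 1).filter (fun j => decide (j ≤ L))
        = PySem.List.pyRange a (min b (L + 1)) 1 := by
  intro n
  induction n using Nat.strong_induction_on with
  | _ n ih =>
    intro a b hn
    by_cases hab : b ≤ a
    · rw [PySem.List.pyRange_one_eq_nil hab,
        PySem.List.pyRange_one_eq_nil (le_trans (min_le_left _ _) hab)]
      rfl
    · replace hab : a < b := by omega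
      rw [PySem.List.pyRange_one_cons hab, List.filter_cons]
      by_cases haL : a ≤ L
      · rw [if_pos (by simpa using haL),
          ih (b - (a + 1)).toNat (by omega) (a + 1) b rfl,
          PySem.List.pyRange_one_cons (by omega : a < min b (L + 1))]
      · rw [if_neg (by simpa using haL),
          ih (b - (a + 1)).toNat (by omega) (a + 1) b rfl,
          PySem.List.pyRange_one_eq_nil (by omega),
          PySem.List.pyRange_one_eq_nil (by omega)]

theorem sum_map_update (K : List Int) (f g : Int → Int) (i : Int)
    (hnd : K.Nodup) (hi : i ∈ K) (hfg : ∀ k ∈ K, k ≠ i → f k = g k) :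
    (K.map f).sum = (K.map g).sum + (f i - g i) := by
  induction K with
  | nil => simp at hi
  | cons k K ih =>
    rcases List.mem_cons.mp hi with hik | hiK
    · subst hik
      have htail : K.map f = K.map g := by
        refine List.map_congr_left ?_
        intro k' hk'
        exact hfg k' (List.mem_cons_of_mem _ hk')
          (fun hki => (List.nodup_cons.mp hnd).1 (hki ▸ hk'))
      simp only [List.map_cons, List.sum_cons, htail]
      ring
    · have hhead : f k = g k :=
        hfg k List.mem_cons_self (fun hki => (List.nodup_cons.mp hnd).1 (hki ▸ hiK))
      simp only [List.map_cons, List.sum_cons,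
        ih (List.nodup_cons.mp hnd).2 hiK
          (fun k' hk' => hfg k' (List.mem_cons_of_mem _ hk')), hhead]
      ring

theorem dotK_insert_right (K : List Int) (c w : PySem.Dict Int Int) (i v : Int)
    (hnd : K.Nodup) (hi : i ∈ K) :
    dotK K c (w.insert i v) = dotK K c w + c.getD i 0 * (v - w.getD i 0) := by
  unfold dotK
  rw [sum_map_update K _ (fun k => c.getD k 0 * w.getD k 0) i hnd hi
    (fun k _ hk => by rw [PySem.Dict.getD_insert_of_ne w v 0 hk]),
    PySem.Dict.getD_insert_self]
  ring

theorem dotK_insert_left (K : List Int) (c w : PySem.Dict Int Int) (j v : Int)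
    (hnd : K.Nodup) (hj : j ∈ K) :
    dotK K (c.insert j v) w = dotK K c w + (v - c.getD j 0) * w.getD j 0 := by
  unfold dotK
  rw [sum_map_update K _ (fun k => c.getD k 0 * w.getD k 0) j hnd hj
    (fun k _ hk => by rw [PySem.Dict.getD_insert_of_ne c v 0 hk]),
    PySem.Dict.getD_insert_self]
  ring

theorem keys_insert_mem (d : PySem.Dict Int Int) (j v : Int) (hj : j ∈ d.keys) :
    (d.insert j v).keys = d.keys :=
  PySem.Dict.keys_insert_of_contains d v ((PySem.Dict.contains_iff_mem_keys d j).mpr hj)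

theorem keys_foldl_insert_mem (f : PySem.Dict Int Int → Int → Int) :
    ∀ (l : List Int) (d : PySem.Dict Int Int), (∀ j ∈ l, j ∈ d.keys) →
      (l.foldl (fun d j => d.insert j (f d j)) d).keys = d.keys := by
  intro l
  induction l with
  | nil => intro d _; rfl
  | cons j l ih =>
    intro d hl
    rw [List.foldl_cons,
      ih _ (fun j' hj' => by
        rw [keys_insert_mem d j _ (hl j List.mem_cons_self)]
        exact hl j' (List.mem_cons_of_mem _ hj')),
      keys_insert_mem d j _ (hl j List.mem_cons_self)]

theorem dot_push (K : List Int) (w : PySem.Dict Int Int) (i : Int) (hnd : K.Nodup) :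
    ∀ (l : List Int) (c : PySem.Dict Int Int), (∀ j ∈ l, j ∈ K ∧ i < j) →
      dotK K (l.foldl (fun d j => d.insert j (d.getD j 0 + d.getD i 0)) c) w
        = dotK K c w + c.getD i 0 * (l.map (fun j => w.getD j 0)).sum := by
  intro l
  induction l with
  | nil => intro c _; simp
  | cons j l ih =>
    intro c hl
    obtain ⟨hjK, hij⟩ := hl j List.mem_cons_self
    rw [List.foldl_cons, ih _ (fun j' hj' => hl j' (List.mem_cons_of_mem _ hj')),
      dotK_insert_left K c w j _ hnd hjK,
      PySem.Dict.getD_insert_of_ne c _ 0 (by omega : i ≠ j)]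
    simp only [List.map_cons, List.sum_cons]
    ring

theorem adjoint (sc : List (Int × List Int × List Int)) (K : List Int) (last : Int)
    (c w : PySem.Dict Int Int) (i : Int) (hnd : K.Nodup) (hok : okId sc K last i) :
    dotK K (Fstep sc last c i) w = dotK K c (Gstep sc last w i) := by
  unfold Fstep Gstep
  rw [dot_push K w i hnd (copiesOf sc last i) c
      (fun j hj => ⟨(hok.2 j hj).1, (hok.2 j hj).2⟩),
    dotK_insert_right K c w i _ hnd hok.1]
  ring

-- the duality: the forward push total equals the reverse pull total
theorem duality (sc : List (Int × List Int × List Int)) (K : List Int) (last : Int)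
    (ones : PySem.Dict Int Int) (hnd : K.Nodup) (hones : ∀ k ∈ K, ones.getD k 0 = 1) :
    ∀ (L : List Int) (c : PySem.Dict Int Int), c.keys = K → (∀ i ∈ L, okId sc K last i) →
      sumK K (L.foldl (Fstep sc last) c)
        = dotK K c (L.foldr (fun i w => Gstep sc last w i) ones) := by
  intro L
  induction L with
  | nil =>
    intro c _ _
    unfold sumK dotK
    simp only [List.foldl_nil, List.foldr_nil]
    refine congrArg List.sum (List.map_congr_left ?_)
    intro k hk
    rw [hones k hk, mul_one]
  | cons i L ih =>
    intro c hc hL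
    have hok := hL i List.mem_cons_self
    have hkeys : (Fstep sc last c i).keys = K := by
      unfold Fstep
      rw [keys_foldl_insert_mem _ (copiesOf sc last i) c
        (fun j hj => by rw [hc]; exact (hok.2 j hj).1)]
      exact hc
    rw [List.foldl_cons, ih _ hkeys (fun i' hi' => hL i' (List.mem_cons_of_mem _ hi')),
      List.foldr_cons, adjoint sc K last c _ i hnd hok]

theorem keys_Fstep (sc : List (Int × List Int × List Int)) (K : List Int) (last : Int)
    (c : PySem.Dict Int Int) (i : Int) (hc : c.keys = K) (hok : okId sc K last i) :
    (Fstep sc last c i).keys = K := by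
  unfold Fstep
  rw [keys_foldl_insert_mem _ (copiesOf sc last i) c
    (fun j hj => by rw [hc]; exact (hok.2 j hj).1)]
  exact hc

theorem keys_foldl_Fstep (sc : List (Int × List Int × List Int)) (K : List Int) (last : Int) :
    ∀ (L : List Int) (c : PySem.Dict Int Int), c.keys = K → (∀ i ∈ L, okId sc K last i) →
      (L.foldl (Fstep sc last) c).keys = K := by
  intro L
  induction L with
  | nil => intro c hc _; exact hc
  | cons i L ih =>
    intro c hc hL
    rw [List.foldl_cons]
    exact ih _ (keys_Fstep sc K last c i hc (hL i List.mem_cons_self))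
      (fun i' hi' => hL i' (List.mem_cons_of_mem _ hi'))

theorem getD_foldl_insert_one :
    ∀ (l : List Int) (d : PySem.Dict Int Int) (k : Int),
      (l.foldl (fun d x => d.insert x (1 : Int)) d).getD k 0
        = if k ∈ l then 1 else d.getD k 0 := by
  intro l
  induction l with
  | nil => intro d k; simp
  | cons x l ih =>
    intro d k
    rw [List.foldl_cons, ih]
    by_cases hkl : k ∈ l
    · rw [if_pos hkl, if_pos (List.mem_cons_of_mem _ hkl)]
    · rw [if_neg hkl]
      by_cases hkx : k = x
      · subst hkx
        rw [PySem.Dict.getD_insert_self, if_pos List.mem_cons_self]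
      · rw [PySem.Dict.getD_insert_of_ne d 1 0 hkx,
          if_neg (by simp [List.mem_cons, hkx, hkl])]

theorem values_sum_eq_sumK (K : List Int) (d : PySem.Dict Int Int)
    (hk : d.keys = K) (hnd : K.Nodup) : d.values.sum = sumK K d := by
  rw [PySem.Dict.values_eq_map_keys d (hk ▸ hnd) 0, hk]
  rfl

theorem keys_Gstep (sc : List (Int × List Int × List Int)) (last : Int)
    (w : PySem.Dict Int Int) (i : Int) (hi : i ∈ w.keys) :
    (Gstep sc last w i).keys = w.keys :=
  keys_insert_mem w i _ hi

theorem keys_foldr_Gstep (sc : List (Int × List Int × List Int)) (K : List Int) (last : Int) :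
    ∀ (L : List Int) (w : PySem.Dict Int Int), w.keys = K → (∀ i ∈ L, i ∈ K) →
      (L.foldr (fun i w => Gstep sc last w i) w).keys = K := by
  intro L
  induction L with
  | nil => intro w hw _; exact hw
  | cons i L ih =>
    intro w hw hL
    have hkeysL : (L.foldr (fun i w => Gstep sc last w i) w).keys = K :=
      ih w hw (fun i' hi' => hL i' (List.mem_cons_of_mem _ hi'))
    rw [List.foldr_cons,
      keys_Gstep sc last _ i (by rw [hkeysL]; exact hL i List.mem_cons_self), hkeysL]

-- B's pyRange with a min endpoint is A's filtered pyRange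
theorem range_min_eq_copiesOf (sc : List (Int × List Int × List Int)) (last i : Int) :
    PySem.List.pyRange (i + 1)
        (min (i + ((((PySem.List.pyGet? sc (i - 1)).getD (0, ([], []))).2.2.countP
          (fun x => ((PySem.List.pyGet? sc (i - 1)).getD (0, ([], []))).2.1.contains x) : Nat) : Int))
          last + 1) 1
      = copiesOf sc last i := by
  unfold copiesOf
  rw [filter_le_pyRange last
    ((i + num_matches ((PySem.List.pyGet? sc (i - 1)).getD (0, ([], []))) + 1) - (i + 1)).toNat
    _ _ rfl]
  congr 1
  have hm : ((((PySem.List.pyGet? sc (i - 1)).getD (0, ([], []))).2.2.countP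
      (fun x => ((PySem.List.pyGet? sc (i - 1)).getD (0, ([], []))).2.1.contains x) : Nat) : Int)
      = num_matches ((PySem.List.pyGet? sc (i - 1)).getD (0, ([], []))) := by
    simp [num_matches, List.countP_eq_length_filter]
  rw [hm]
  omega

-- ===== VERDICT (by name: the statement is the Claim_ definition above) =====
theorem part2_spec : Claim_equal_part2 := by
  intro sc _ hpre
  obtain ⟨hne, hok⟩ := hpre
  unfold Spec_part2
  have hne' : sc.map (fun i => i.1) ≠ [] := by
    simpa using hne
  obtain ⟨last, hlast⟩ : ∃ l, PySem.List.pyGet? (sc.map (fun i => i.1)) (-1) = some l := by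
    rw [PySem.List.pyGet?_neg_one]
    cases hg : (sc.map (fun i => i.1)).getLast? with
    | none => exact absurd (List.getLast?_eq_none_iff.mp hg) hne'
    | some l => exact ⟨l, rfl⟩
  set ids := sc.map (fun i => i.1) with hids
  set K := PySem.Set.ofList ids with hK
  set counts0 : PySem.Dict Int Int :=
    ids.foldl (fun d id => d.insert id 1) PySem.Dict.empty with hcounts0
  have hndK : K.Nodup := PySem.Set.nodup_ofList ids
  have hkeys0 : counts0.keys = K := by
    rw [hcounts0, PySem.Dict.keys_foldl_insert]
    rfl
  have hones : ∀ k ∈ K, counts0.getD k 0 = 1 := by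
    intro k hk
    rw [hcounts0, getD_foldl_insert_one,
      if_pos ((PySem.Set.mem_ofList ids k).mp hk)]
  have hokK : ∀ i ∈ ids, okId sc K last i := by
    intro i hi
    refine ⟨(PySem.Set.mem_ofList ids i).mpr hi, ?_⟩
    intro j hj
    have hj' := List.mem_filter.mp hj
    have hjr := (PySem.List.mem_pyRange_one).mp hj'.1
    have hjlast : j ≤ last := by simpa using hj'.2
    have hjids : j ∈ ids := by
      have := (hok i hi).2 j hj'.1
      rw [hlast] at this
      exact this (by simpa using hjlast)
    exact ⟨(PySem.Set.mem_ofList ids j).mpr hjids, by omega⟩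
  have hA : part2 sc = (ids.foldl (Fstep sc last) counts0).values.sum := by
    simp only [part2]
    rw [← hids, hlast]
    show (ids.foldl (Fstep sc last) counts0).values.sum = _
    rfl
  have hB : part2_alt sc = (ids.foldr (fun i w => Gstep sc last w i) counts0).values.sum := by
    simp only [part2_alt]
    rw [← hids, if_neg hne', hlast]
    simp only [Option.getD_some]
    rw [List.foldl_reverse]
    show (ids.foldr (fun i w =>
        w.insert i (w.getD i 0 +
          ((PySem.List.pyRange (i + 1)
              (min (i + ((((PySem.List.pyGet? sc (i - 1)).getD (0, ([], []))).2.2.countP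
                (fun x => ((PySem.List.pyGet? sc (i - 1)).getD (0, ([], []))).2.1.contains x) : Nat) : Int))
                last + 1) 1).map
            (fun j => w.getD j 0)).sum)) counts0).values.sum = _
    have hfun : (fun (i : Int) (w : PySem.Dict Int Int) =>
        w.insert i (w.getD i 0 +
          ((PySem.List.pyRange (i + 1)
              (min (i + ((((PySem.List.pyGet? sc (i - 1)).getD (0, ([], []))).2.2.countP
                (fun x => ((PySem.List.pyGet? sc (i - 1)).getD (0, ([], []))).2.1.contains x) : Nat) : Int))
                last + 1) 1).map
            (fun j => w.getD j 0)).sum))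
        = (fun (i : Int) (w : PySem.Dict Int Int) => Gstep sc last w i) := by
      funext i w
      show _ = Gstep sc last w i
      unfold Gstep
      rw [range_min_eq_copiesOf]
    rw [hfun]
  rw [hA, hB,
    values_sum_eq_sumK K _ (keys_foldl_Fstep sc K last ids counts0 hkeys0 hokK) hndK,
    values_sum_eq_sumK K _ (keys_foldr_Gstep sc K last ids counts0 hkeys0
      (fun i hi => (hokK i hi).1)) hndK,
    duality sc K last counts0 hndK hones ids counts0 hkeys0 hokK]
  unfold dotK sumK
  refine congrArg List.sum (List.map_congr_left ?_)
  intro k hk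
  rw [hones k hk, one_mul]
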